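-- pv_equiv track=rewrite | github.com/woodstock1993/CodingTest | naver_intern/test.py | solution
-- ===== SOURCE A (Python) =====
-- def solution(N):
--     largest = 0
--     shift = 0
--     temp = N
--     for i in range(1, 30):
--         index = (temp & 1)
--         temp = (temp >> 1) | (index << 30)
--         if (temp > largest):
--             largest = temp
--             shift = i
--     return shift
-- ===== SOURCE B (Python) =====
-- def solution(N):
--     # Build the table of all 29 rotated values, then select:
--     # max <= 0 means no rotation ever beat the initial 0, so shift 0;
--     # otherwise the answer is the first position of the maximum.
--     def rot(t):
--         return (t >> 1) | ((t & 1) << 30)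
--     vals = []
--     t = N
--     for _ in range(29):
--         t = rot(t)
--         vals.append(t)
--     m = max(vals)
--     return 0 if m <= 0 else vals.index(m) + 1
-- ===== Notes on version B (the rewrite author's own statement) =====
-- stated objective: alternative
-- what changed: A tracks the running max and its first shift inside the rotation loop; B builds the full table of rotated values and then selects with max() and list.index() (returning 0 when the max is not positive).
import Mathlib
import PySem

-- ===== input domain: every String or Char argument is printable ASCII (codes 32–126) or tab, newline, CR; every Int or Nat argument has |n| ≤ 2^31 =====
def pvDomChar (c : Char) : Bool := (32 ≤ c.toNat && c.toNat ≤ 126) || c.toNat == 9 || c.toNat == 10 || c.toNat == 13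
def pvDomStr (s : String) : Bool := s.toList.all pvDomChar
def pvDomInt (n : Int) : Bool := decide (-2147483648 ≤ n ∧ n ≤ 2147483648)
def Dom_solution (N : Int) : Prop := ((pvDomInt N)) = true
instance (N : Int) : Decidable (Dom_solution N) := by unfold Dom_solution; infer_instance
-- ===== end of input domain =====

-- B replaces A's running-max/argmax tracking by building the table of all 29 rotated
-- values and then selecting max/first-index from it (alternative decomposition).


-- ===== PORT A =====
-- A's loop body: index = temp & 1; temp = (temp >> 1) | (index << 30); update (largest, shift)
def stepA (st : Int × Int × Int) (i : Int) : Int × Int × Int :=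
  let index := PySem.Int.band st.2.2 1
  let temp := PySem.Int.bor (st.2.2 >>> 1) (index <<< 30)
  if temp > st.1 then (temp, i, temp) else (st.1, st.2.1, temp)

def solution (N : Int) : Int :=
  -- state (largest, shift, temp), initially (0, 0, N); for i in range(1, 30)
  ((PySem.List.pyRange 1 30 1).foldl stepA (0, 0, N)).2.1

-- ===== PORT B =====
-- Source B's helper rot(t)
def rotB (t : Int) : Int := PySem.Int.bor (t >>> 1) (PySem.Int.band t 1 <<< 30)

-- Source B's loop body: t = rot(t); vals.append(t)   (state (vals, t))
def stepB (st : List Int × Int) (_ : Int) : List Int × Int :=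
  let t := rotB st.2
  (st.1 ++ [t], t)

def solution_alt (N : Int) : Int :=
  let vals := ((PySem.List.pyRange 0 29 1).foldl stepB ([], N)).1
  -- max(vals): vals has 29 elements, so max? always succeeds; getD 0 is never its default
  let m := (PySem.List.max? vals (fun x => x)).getD 0
  if m ≤ 0 then 0
  -- vals.index(m): m = max(vals) ∈ vals, so index? always succeeds; getD 0 is never its default
  else (((PySem.List.index? vals m).getD 0 : Nat) : Int) + 1

-- ===== PRECONDITION & SPEC =====
def Spec_solution (N : Int) (out : Int) : Prop := out = solution_alt N
instance (N : Int) (out : Int) : Decidable (Spec_solution N out) := by unfold Spec_solution; infer_instance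

-- ===== CLAIM (what is proved, stated in full; the proofs are below) =====
def Claim_equal_solution : Prop := ∀ (N : Int), Dom_solution N → Spec_solution N (solution N)

-- ===== LEMMAS AND PROOFS =====

-- the sequence of rotated values starting from t
def valsFrom (t : Int) : Nat → List Int
  | 0 => []
  | n + 1 => rotB t :: valsFrom (rotB t) n

-- pure argmax fold: A's loop with the temp-sequence abstracted into the value list
def sel (l s i : Int) : List Int → Int
  | [] => s
  | v :: vs => if v > l then sel v i (i + 1) vs else sel l s (i + 1) vs

theorem stepA_eq (l s t i : Int) :
    stepA (l, s, t) i = if rotB t > l then (rotB t, i, rotB t) else (l, s, rotB t) := rfl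

theorem sel_le (vs : List Int) : ∀ (l s i : Int), (∀ v ∈ vs, v ≤ l) → sel l s i vs = s := by
  induction vs with
  | nil => intro l s i _; rfl
  | cons v tl ih =>
    intro l s i h
    have hv : v ≤ l := h v (by simp)
    simp only [sel, if_neg (by omega : ¬ v > l)]
    exact ih l s (i + 1) (fun x hx => h x (by simp [hx]))

theorem max_val_eq (vs : List Int) (m : Int) (hmem : m ∈ vs)
    (hmax : ∀ y ∈ vs, y ≤ m) : PySem.List.max? vs (fun x => x) = some m := by
  cases hm : PySem.List.max? vs (fun x => x) with
  | none =>
    rw [PySem.List.max?_eq_none_iff] at hm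
    simp [hm] at hmem
  | some m' =>
    have h1 : m ≤ m' := PySem.List.max?_isMax hm m hmem
    have h2 : m' ≤ m := hmax m' (PySem.List.max?_mem hm)
    rw [le_antisymm h2 h1]

theorem sel_gt (vs : List Int) : ∀ (l s i m : Int) (j : Nat),
    PySem.List.max? vs (fun x => x) = some m →
    PySem.List.index? vs m = some j → l < m → sel l s i vs = i + j := by
  induction vs with
  | nil =>
    intro l s i m j hm _ _
    have hn : (PySem.List.max? ([] : List Int) (fun x => x)) = none :=
      (PySem.List.max?_eq_none_iff _ _).mpr rfl
    rw [hn] at hm; cases hm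
  | cons v tl ih =>
    intro l s i m j hm hj hl
    have hmem : m ∈ v :: tl := PySem.List.max?_mem hm
    have hmax : ∀ y ∈ v :: tl, y ≤ m := fun y hy => PySem.List.max?_isMax hm y hy
    by_cases hv : v = m
    · subst hv
      rw [PySem.List.index?_cons_self] at hj
      injection hj with hj0
      subst hj0
      simp only [sel, if_pos (by omega : v > l)]
      rw [sel_le tl v i (i + 1) (fun x hx => hmax x (by simp [hx]))]
      simp
    · have hvm : v < m := lt_of_le_of_ne (hmax v (by simp)) hv
      have hmtl : m ∈ tl := by
        rcases List.mem_cons.mp hmem with h | h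
        · exact absurd h.symm hv
        · exact h
      have hmaxtl : PySem.List.max? tl (fun x => x) = some m :=
        max_val_eq tl m hmtl (fun y hy => hmax y (by simp [hy]))
      rw [PySem.List.index?_cons_of_ne tl hv] at hj
      rcases Option.map_eq_some_iff.mp hj with ⟨j', hj', hjj⟩
      subst hjj
      simp only [sel]
      split_ifs with hvl
      · rw [ih v i (i + 1) m j' hmaxtl hj' hvm]; push_cast; ring
      · rw [ih l s (i + 1) m j' hmaxtl hj' hl]; push_cast; ring

-- A's loop over range(i, i+n) computes sel over the rotated-value table
theorem foldA (n : Nat) : ∀ (i l s t : Int),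
    ((PySem.List.pyRange i (i + n) 1).foldl stepA (l, s, t)).2.1
      = sel l s i (valsFrom t n) := by
  induction n with
  | zero =>
    intro i l s t
    norm_num [PySem.List.pyRange_one, valsFrom, sel]
  | succ n ih =>
    intro i l s t
    have hcons : PySem.List.pyRange i (i + (n + 1 : Nat)) 1
        = i :: PySem.List.pyRange (i + 1) (i + (n + 1 : Nat)) 1 :=
      PySem.List.pyRange_one_cons (by push_cast; omega)
    rw [hcons, List.foldl_cons, stepA_eq,
      show i + ((n : Nat) + 1 : Nat) = (i + 1) + (n : Nat) by push_cast; ring]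
    simp only [valsFrom, sel]
    split_ifs with h
    · exact ih (i + 1) (rotB t) i (rotB t)
    · exact ih (i + 1) l s (rotB t)

-- B's loop over range(29) builds the rotated-value table
theorem foldB (L : List Int) : ∀ (acc : List Int) (t : Int),
    (L.foldl stepB (acc, t)).1 = acc ++ valsFrom t L.length := by
  induction L with
  | nil => intro acc t; simp [valsFrom]
  | cons x tl ih =>
    intro acc t
    simp only [List.foldl_cons, stepB, List.length_cons, valsFrom]
    rw [ih (acc ++ [rotB t]) (rotB t)]
    simp

theorem valsFrom_ne_nil (t : Int) : valsFrom t 29 ≠ [] := by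
  simp [valsFrom]

theorem solution_eq_alt (N : Int) : solution N = solution_alt N := by
  unfold solution solution_alt
  have hA : ((PySem.List.pyRange 1 30 1).foldl stepA (0, 0, N)).2.1
      = sel 0 0 1 (valsFrom N 29) := by
    have h := foldA 29 1 0 0 N
    norm_num at h
    exact h
  have hB : ((PySem.List.pyRange 0 29 1).foldl stepB ([], N)).1 = valsFrom N 29 := by
    have h := foldB (PySem.List.pyRange 0 29 1) [] N
    rw [h, PySem.List.length_pyRange_one]
    simp only [List.nil_append]
    rfl
  rw [hA, hB]
  cases hm : PySem.List.max? (valsFrom N 29) (fun x => x) with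
  | none =>
    rw [PySem.List.max?_eq_none_iff] at hm
    exact absurd hm (valsFrom_ne_nil N)
  | some m =>
    have hmem : m ∈ valsFrom N 29 := PySem.List.max?_mem hm
    have hmax : ∀ y ∈ valsFrom N 29, y ≤ m := fun y hy => PySem.List.max?_isMax hm y hy
    simp only [hm, Option.getD_some]
    by_cases h0 : m ≤ 0
    · rw [if_pos h0]
      exact sel_le _ 0 0 1 (fun v hv => le_trans (hmax v hv) h0)
    · rw [if_neg h0]
      cases hj : PySem.List.index? (valsFrom N 29) m with
      | none =>
        rw [PySem.List.index?_eq_none_iff] at hj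
        exact absurd hmem hj
      | some j =>
        rw [sel_gt _ 0 0 1 m j hm hj (by omega), Option.getD_some]
        ring

-- ===== VERDICT (by name: the statement is the Claim_ definition above) =====
theorem solution_spec : Claim_equal_solution := by
  intro N _
  unfold Spec_solution
  exact solution_eq_alt N
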